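-- pv_equiv track=rewrite | github.com/Wulfic/Cicada3301 | tools/archive/advanced_cipher_analysis.py | totient_shift
-- ===== SOURCE A (Python) =====
-- def totient_shift(indices):
--     """Shift by totient of position"""
--     def euler_phi(n):
--         result = n
--         p = 2
--         while p * p <= n:
--             if n % p == 0:
--                 while n % p == 0:
--                     n //= p
--                 result -= result // p
--             p += 1
--         if n > 1:
--             result -= result // n
--         return max(1, result)
--
--     return [(indices[i] - euler_phi(i + 1)) % 29 for i in range(len(indices))]
-- ===== SOURCE B (Python) =====
-- def totient_shift(indices):
--     """Shift by totient of position (sieve-based phi precomputation)"""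
--     n = len(indices)
--     phi = list(range(n + 1))
--     for p in range(2, n + 1):
--         if phi[p] == p:  # p is prime: no smaller prime touched it
--             for m in range(p, n + 1, p):
--                 phi[m] -= phi[m] // p
--     return [(v - phi[i + 1]) % 29 for i, v in enumerate(indices)]
-- ===== Notes on version B (the rewrite author's own statement) =====
-- stated objective: faster
-- what changed: Replaced per-position trial-division factorization of Euler's totient by a single Euler-phi sieve over all positions, then one pass over the list.
import Mathlib
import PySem

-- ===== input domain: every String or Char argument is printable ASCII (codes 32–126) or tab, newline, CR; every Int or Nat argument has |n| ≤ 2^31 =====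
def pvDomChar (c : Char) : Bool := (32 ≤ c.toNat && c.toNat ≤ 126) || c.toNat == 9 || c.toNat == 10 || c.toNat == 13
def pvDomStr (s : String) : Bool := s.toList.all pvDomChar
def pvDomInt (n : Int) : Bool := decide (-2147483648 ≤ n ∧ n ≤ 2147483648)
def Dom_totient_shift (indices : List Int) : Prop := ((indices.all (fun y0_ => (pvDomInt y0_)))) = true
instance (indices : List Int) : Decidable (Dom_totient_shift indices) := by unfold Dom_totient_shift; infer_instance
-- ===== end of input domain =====

-- B replaces A's per-position trial-division totient by one Euler-phi sieve over all
-- positions (objective: faster — a timing run measures the speed-up).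

-- ===== PORT A =====
-- inner `while n % p == 0: n //= p` of euler_phi (fuel-totalized; fuel n suffices)
def phiAStrip : Nat → Nat → Nat → Nat
  | 0, n, _ => n
  | f+1, n, p => if n % p == 0 then phiAStrip f (n / p) p else n

-- used by phiALoop's termination proof
theorem phiAStrip_le (f n p : Nat) : phiAStrip f n p ≤ n := by
  induction f generalizing n with
  | zero => simp [phiAStrip]
  | succ f ih =>
    simp only [phiAStrip]
    split
    · exact le_trans (ih _) (Nat.div_le_self _ _)
    · exact le_rfl

-- outer `while p * p <= n` of euler_phi, then the trailing `if n > 1` and return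
def phiALoop (n result p : Nat) : Nat :=
  if p * p ≤ n then
    if n % p == 0 then
      phiALoop (phiAStrip n n p) (result - result / p) (p + 1)
    else phiALoop n result (p + 1)
  else if 1 < n then result - result / n else result
termination_by n + 1 - p
decreasing_by
  · have h1 := phiAStrip_le n n p
    have h2 : p = 0 ∨ p ≤ n := by
      rcases Nat.eq_zero_or_pos p with h | h
      · exact Or.inl h
      · exact Or.inr (le_trans (Nat.le_mul_of_pos_left p h) (by assumption))
    omega
  · have h2 : p = 0 ∨ p ≤ n := by
      rcases Nat.eq_zero_or_pos p with h | h
      · exact Or.inl h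
      · exact Or.inr (le_trans (Nat.le_mul_of_pos_left p h) (by assumption))
    omega

-- euler_phi; it is only ever applied to the 1-based position i+1, a natural number
def eulerPhiA (n : Nat) : Nat := max 1 (phiALoop n n 2)

def totient_shift (indices : List Int) : List Int :=
  (List.range indices.length).map fun i =>
    PySem.Int.mod ((PySem.List.pyGet? indices (Int.ofNat i)).getD 0 - Int.ofNat (eulerPhiA (i + 1))) 29

-- ===== PORT B =====
-- phi = list(range(n+1)); for p in range(2,n+1): if phi[p]==p: for m in range(p,n+1,p): phi[m] -= phi[m]//p
def sievePhi (n : Nat) : List Nat :=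
  (List.range' 2 (n - 1)).foldl
    (fun phi p =>
      if phi[p]! = p then
        (List.range' p (n / p) p).foldl (fun a m => a.set m (a[m]! - a[m]! / p)) phi
      else phi)
    (List.range (n + 1))

def totient_shift_alt (indices : List Int) : List Int :=
  let phi := sievePhi indices.length
  (PySem.List.enumerate indices 0).map fun iv =>
    PySem.Int.mod (iv.2 - Int.ofNat (phi[iv.1.toNat + 1]!)) 29

-- ===== PRECONDITION & SPEC =====
def Spec_totient_shift (indices : List Int) (out : List Int) : Prop := out = totient_shift_alt indices
instance (indices : List Int) (out : List Int) : Decidable (Spec_totient_shift indices out) := by unfold Spec_totient_shift; infer_instance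

-- ===== CLAIM (what is proved, stated in full; the proofs are below) =====
def Claim_equal_totient_shift : Prop := ∀ (indices : List Int), Dom_totient_shift indices → Spec_totient_shift indices (totient_shift indices)

-- ===== LEMMAS AND PROOFS =====

theorem pow_pred_mul {p k : Nat} (hk : 0 < k) : p ^ k = p * p ^ (k - 1) := by
  obtain ⟨k', rfl⟩ : ∃ k', k = k' + 1 := ⟨k - 1, by omega⟩
  rw [Nat.add_sub_cancel, pow_succ, Nat.mul_comm]

-- ---- A-side: the trial-division loop computes Euler's totient ----

theorem strip_eq {p : Nat} (hp : p.Prime) :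
    ∀ f n, n ≠ 0 → n.factorization p ≤ f → phiAStrip f n p = n / p ^ n.factorization p := by
  intro f
  induction f with
  | zero =>
    intro n hn hle
    have h0 : n.factorization p = 0 := Nat.le_zero.mp hle
    simp [phiAStrip, h0]
  | succ f ih =>
    intro n hn hle
    by_cases hd : p ∣ n
    · have hmod : n % p = 0 := (Nat.dvd_iff_mod_eq_zero).mp hd
      have hk : 0 < n.factorization p := hp.factorization_pos_of_dvd hn hd
      have hnp : n / p ≠ 0 := by
        have := Nat.div_pos (Nat.le_of_dvd (Nat.pos_of_ne_zero hn) hd) hp.pos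
        omega
      have hfac : (n / p).factorization p = n.factorization p - 1 := by
        rw [Nat.factorization_div hd, hp.factorization]
        simp
      have hrec := ih (n / p) hnp (by omega)
      simp only [phiAStrip, hmod, beq_self_eq_true, if_true]
      rw [hrec, hfac, Nat.div_div_eq_div_mul]
      congr 1
      rw [pow_pred_mul hk]
    · have h0 : n.factorization p = 0 := Nat.factorization_eq_zero_of_not_dvd hd
      have hmod : ¬ (n % p = 0) := fun h => hd ((Nat.dvd_iff_mod_eq_zero).mpr h)
      simp [phiAStrip, hmod, h0]

theorem phiALoop_exit (p n c : Nat) (hpn : ¬ p * p ≤ n) (hn : 1 ≤ n) (_hc : 1 ≤ c)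
    (hN : ∀ q, q.Prime → q ∣ n → p ≤ q) (hC : ∀ q, q.Prime → q ∣ c → q < p) :
    (if 1 < n then Nat.totient c * n - (Nat.totient c * n) / n else Nat.totient c * n)
      = Nat.totient (c * n) := by
  by_cases h1 : 1 < n
  · have hprime : n.Prime := by
      by_contra hnp
      have hsq := Nat.minFac_sq_le_self (by omega) hnp
      have hf := Nat.minFac_prime (show n ≠ 1 by omega)
      have hge : p ≤ n.minFac := hN _ hf (Nat.minFac_dvd n)
      have h2 : p * p ≤ n.minFac * n.minFac := Nat.mul_le_mul hge hge
      have h3 : p * p ≤ n := le_trans h2 (by nlinarith [hsq])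
      exact hpn h3
    have hdiv : (Nat.totient c * n) / n = Nat.totient c := Nat.mul_div_cancel _ (by omega)
    have hcop : n.Coprime c := hprime.coprime_iff_not_dvd.mpr (by
      intro hdc
      have ha := hC n hprime hdc
      have hb := hN n hprime dvd_rfl
      omega)
    rw [if_pos h1, hdiv, Nat.totient_mul hcop.symm, Nat.totient_prime hprime,
      Nat.mul_sub, Nat.mul_one]
  · have hn1 : n = 1 := by omega
    subst hn1
    simp

theorem phiALoop_eq :
    ∀ fuel p n c, n + 1 - p ≤ fuel → 2 ≤ p → 1 ≤ n → 1 ≤ c →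
      (∀ q, q.Prime → q ∣ n → p ≤ q) → (∀ q, q.Prime → q ∣ c → q < p) →
      phiALoop n (Nat.totient c * n) p = Nat.totient (c * n) := by
  intro fuel
  induction fuel with
  | zero =>
    intro p n c hfuel hp hn hc hN hC
    have hpn : ¬ p * p ≤ n := by
      intro h
      have := Nat.le_mul_of_pos_left p (show 0 < p by omega)
      omega
    rw [phiALoop, if_neg hpn]
    exact phiALoop_exit p n c hpn hn hc hN hC
  | succ fuel ih =>
    intro p n c hfuel hp hn hc hN hC
    by_cases hpp : p * p ≤ n
    · have hpn : p ≤ n := le_trans (Nat.le_mul_of_pos_left p (by omega)) hpp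
      by_cases hd : p ∣ n
      · -- p divides n: p must be prime, strip it out completely
        have hprime : p.Prime := by
          by_contra hnp
          have hmf := Nat.minFac_prime (show p ≠ 1 by omega)
          have hlt : p.minFac < p := by
            have hle : p.minFac ≤ p := Nat.le_of_dvd (by omega) (Nat.minFac_dvd p)
            rcases lt_or_eq_of_le hle with h | h
            · exact h
            · exact absurd (h ▸ hmf) hnp
          have := hN p.minFac hmf (dvd_trans (Nat.minFac_dvd p) hd)
          omega
        have hmod : n % p = 0 := (Nat.dvd_iff_mod_eq_zero).mp hd
        set k := n.factorization p with hk
        have hkpos : 0 < k := hprime.factorization_pos_of_dvd (by omega) hd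
        have hstrip : phiAStrip n n p = n / p ^ k :=
          strip_eq hprime n n (by omega) (le_of_lt (Nat.factorization_lt p (by omega)))
        set n' := n / p ^ k with hn'
        have hmul : p ^ k * n' = n := Nat.ordProj_mul_ordCompl_eq_self n p
        have hn'pos : 1 ≤ n' := by
          rcases Nat.eq_zero_or_pos n' with h | h
          · rw [h, Nat.mul_zero] at hmul; omega
          · exact h
        have hnd : ¬ p ∣ n' := Nat.not_dvd_ordCompl hprime (by omega)
        have hcoppow : c.Coprime (p ^ k) := by
          have hpc : ¬ p ∣ c := fun h => absurd (hC p hprime h) (by omega)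
          exact (Nat.Coprime.pow_right k ((hprime.coprime_iff_not_dvd.mpr hpc).symm))
        have hphipow : Nat.totient (c * p ^ k) = Nat.totient c * (p ^ (k - 1) * (p - 1)) := by
          rw [Nat.totient_mul hcoppow, Nat.totient_prime_pow hprime hkpos]
        have hneq : n = p * (p ^ (k - 1) * n') := by rw [← hmul, pow_pred_mul hkpos]; ring
        -- the subtraction step: φc·n − (φc·n)/p = φ(c·p^k)·n'
        have hres : Nat.totient c * n - (Nat.totient c * n) / p
            = Nat.totient (c * p ^ k) * n' := by
          have h1 : Nat.totient c * n = p * (Nat.totient c * (p ^ (k - 1) * n')) := by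
            rw [hneq]; ring
          rw [h1, Nat.mul_div_cancel_left _ (show 0 < p by omega)]
          rw [hphipow]
          rw [show p * (Nat.totient c * (p ^ (k - 1) * n'))
              = (Nat.totient c * (p ^ (k - 1) * n')) * p by ring]
          rw [← Nat.mul_sub_one]
          ring
        rw [phiALoop, if_pos hpp, if_pos (by simpa using hmod), hstrip]
        rw [hres]
        have hih := ih (p + 1) n' (c * p ^ k)
          (by have : n' ≤ n := Nat.div_le_self _ _; omega)
          (by omega) hn'pos (Nat.mul_pos hc (pow_pos (by omega) k))
          (by
            intro q hq hqn'
            have hqn : q ∣ n := dvd_trans hqn' ⟨p ^ k, by rw [← hmul]; ring⟩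
            have h1 := hN q hq hqn
            have h2 : q ≠ p := fun h => hnd (h ▸ hqn')
            omega)
          (by
            intro q hq hqc
            rcases (hq.dvd_mul).mp hqc with h | h
            · have := hC q hq h; omega
            · have : q = p := (Nat.prime_dvd_prime_iff_eq hq hprime).mp (hq.dvd_of_dvd_pow h)
              omega)
        rw [hih]
        congr 1
        rw [← hmul]; ring
      · have hmod : ¬ (n % p = 0) := fun h => hd ((Nat.dvd_iff_mod_eq_zero).mpr h)
        rw [phiALoop, if_pos hpp, if_neg (by simpa using hmod)]
        exact ih (p + 1) n c (by omega) (by omega) hn hc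
          (by
            intro q hq hqn
            have h1 := hN q hq hqn
            have h2 : q ≠ p := fun h => hd (h ▸ hqn)
            omega)
          (by intro q hq hqc; have := hC q hq hqc; omega)
    · rw [phiALoop, if_neg hpp]
      exact phiALoop_exit p n c hpp hn hc hN hC

theorem eulerPhiA_eq (n : Nat) (hn : 1 ≤ n) : eulerPhiA n = Nat.totient n := by
  have h := phiALoop_eq (n + 1) 2 n 1 (by omega) (le_refl 2) hn (le_refl 1)
    (fun q hq _ => hq.two_le)
    (fun q hq hqc => by
      have h1 := Nat.le_of_dvd one_pos hqc
      have h2 := hq.one_lt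
      omega)
  simp only [Nat.totient_one, one_mul] at h
  unfold eulerPhiA
  rw [h]
  exact Nat.max_eq_right (Nat.totient_pos.mpr hn)

-- ---- B-side: the sieve computes Euler's totient at every position ----

-- Fphi P m: the value the sieve holds at index m after processing p = 2..P
def Fphi : Nat → Nat → Nat
  | 0, m => m
  | P+1, m => if (P+1).Prime ∧ (P+1) ∣ m then Fphi P m - Fphi P m / (P+1) else Fphi P m

-- smP P m: the P-smooth part of m, ∏_{q ≤ P} q ^ ν_q(m)
def smP : Nat → Nat → Nat
  | 0, _ => 1
  | P+1, m => smP P m * (P+1) ^ (m.factorization (P+1))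

theorem smP_pos (P m : Nat) : 1 ≤ smP P m := by
  induction P with
  | zero => simp [smP]
  | succ P ih =>
    simp only [smP]
    have h : 0 < (P+1) ^ (m.factorization (P+1)) := pow_pos (by omega) _
    exact Nat.mul_pos ih h

theorem prime_dvd_smP {q : Nat} (hq : q.Prime) :
    ∀ P m, q ∣ smP P m → q ≤ P := by
  intro P
  induction P with
  | zero => intro m h; simp [smP] at h; exact absurd h hq.ne_one
  | succ P ih =>
    intro m h
    rcases (hq.dvd_mul).mp h with h1 | h1
    · exact le_trans (ih m h1) (by omega)
    · have : q ∣ P + 1 := hq.dvd_of_dvd_pow h1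
      exact Nat.le_of_dvd (by omega) this

theorem smP_coprime_pow {P m e : Nat} (hp : (P+1).Prime) :
    (smP P m).Coprime ((P+1) ^ e) := by
  apply Nat.Coprime.pow_right
  have hnd : ¬ (P+1) ∣ smP P m := fun h => by have := prime_dvd_smP hp P m h; omega
  exact (hp.coprime_iff_not_dvd.mpr hnd).symm

theorem smP_dvd : ∀ P m, m ≠ 0 → smP P m ∣ m := by
  intro P
  induction P with
  | zero => intro m _; simp [smP]
  | succ P ih =>
    intro m hm
    by_cases hp : (P+1).Prime
    · exact Nat.Coprime.mul_dvd_of_dvd_of_dvd (smP_coprime_pow hp) (ih m hm)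
        (Nat.ordProj_dvd m (P+1))
    · simp [smP, Nat.factorization_eq_zero_of_not_prime m hp, ih m hm]

theorem factorization_smP {q : Nat} (hq : q.Prime) :
    ∀ P m, m ≠ 0 → q ≤ P → (smP P m).factorization q = m.factorization q := by
  intro P
  induction P with
  | zero => intro m _ h; exact absurd h (by have := hq.two_le; omega)
  | succ P ih =>
    intro m hm hqP
    have hsm : smP P m ≠ 0 := by have := smP_pos P m; omega
    have hpow : (P+1) ^ (m.factorization (P+1)) ≠ 0 := by positivity
    by_cases hp : (P+1).Prime
    · rcases Nat.lt_or_ge q (P+1) with hlt | hge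
      · have h1 := ih m hm (by omega)
        have h2 : ((P + 1) ^ (m.factorization (P + 1))).factorization q = 0 := by
          rw [Nat.factorization_pow, hp.factorization]
          simp only [Finsupp.smul_apply, Finsupp.single_apply, smul_eq_mul]
          rw [if_neg (by omega : ¬ (P + 1) = q)]
          simp
        rw [smP, Nat.factorization_mul hsm hpow]
        simp only [Finsupp.add_apply]
        rw [h1, h2, Nat.add_zero]
      · have hqe : q = P + 1 := by omega
        have h1 : (smP P m).factorization q = 0 :=
          Nat.factorization_eq_zero_of_not_dvd
            (fun h => by have := prime_dvd_smP hq P m h; omega)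
        have h2 : ((P + 1) ^ (m.factorization (P + 1))).factorization q = m.factorization q := by
          rw [Nat.factorization_pow, hp.factorization]
          simp only [Finsupp.smul_apply, Finsupp.single_apply, smul_eq_mul]
          rw [if_pos (by omega : (P + 1) = q), mul_one, hqe]
        rw [smP, Nat.factorization_mul hsm hpow]
        simp only [Finsupp.add_apply]
        rw [h1, h2, Nat.zero_add]
    · have hz : m.factorization (P+1) = 0 := Nat.factorization_eq_zero_of_not_prime m hp
      have hqne : q ≠ P + 1 := fun h => hp (h ▸ hq)
      have h1 := ih m hm (by omega)
      rw [smP, hz, pow_zero, Nat.mul_one, h1]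

theorem smP_eq_self {P m : Nat} (hm : m ≠ 0)
    (hall : ∀ q, q.Prime → q ∣ m → q ≤ P) : smP P m = m := by
  have hdvd := smP_dvd P m hm
  have hsm : smP P m ≠ 0 := by have := smP_pos P m; omega
  have ht : smP P m * (m / smP P m) = m := Nat.mul_div_cancel' hdvd
  by_cases h1 : m / smP P m = 1
  · rw [h1, Nat.mul_one] at ht
    exact ht
  · exfalso
    have htne : m / smP P m ≠ 0 := by
      intro h
      rw [h, Nat.mul_zero] at ht
      exact hm ht.symm
    have hr := Nat.minFac_prime h1
    have hrt : (m / smP P m).minFac ∣ (m / smP P m) := Nat.minFac_dvd _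
    have hrm : (m / smP P m).minFac ∣ m :=
      dvd_trans hrt (Nat.div_dvd_of_dvd hdvd)
    have hrP : (m / smP P m).minFac ≤ P := hall _ hr hrm
    have hfacs := congrArg (fun f => f ((m / smP P m).minFac))
      (Nat.factorization_mul hsm htne)
    simp only [Finsupp.add_apply] at hfacs
    rw [ht] at hfacs
    have h2 : (smP P m).factorization ((m / smP P m).minFac)
        = m.factorization ((m / smP P m).minFac) := factorization_smP hr P m hm hrP
    have h4 : 0 < (m / smP P m).factorization ((m / smP P m).minFac) :=
      hr.factorization_pos_of_dvd htne hrt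
    omega

theorem Fphi_eq : ∀ P m, m ≠ 0 → Fphi P m = (m / smP P m) * Nat.totient (smP P m) := by
  intro P
  induction P with
  | zero => intro m _; simp [Fphi, smP]
  | succ P ih =>
    intro m hm
    by_cases hc : (P+1).Prime ∧ (P+1) ∣ m
    · obtain ⟨hq, hqd⟩ := hc
      have hepos : 0 < m.factorization (P+1) := hq.factorization_pos_of_dvd hm hqd
      have hSpos : 1 ≤ smP P m := smP_pos P m
      have hSdvd : smP P m ∣ m := smP_dvd P m hm
      have hsmP1 : (smP P m).factorization (P+1) = 0 :=
        Nat.factorization_eq_zero_of_not_dvd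
          (fun h => by have := prime_dvd_smP hq P m h; omega)
      -- name the smooth part and the exponent so rewriting m is safe
      obtain ⟨S, hSdef⟩ : ∃ S, smP P m = S := ⟨_, rfl⟩
      obtain ⟨e, hedef⟩ : ∃ e, m.factorization (P+1) = e := ⟨_, rfl⟩
      rw [hSdef] at hSpos hSdvd hsmP1
      rw [hedef] at hepos
      obtain ⟨t, ht⟩ : ∃ t, m = S * t := hSdvd
      have htne : t ≠ 0 := by rintro rfl; rw [Nat.mul_zero] at ht; exact hm ht
      -- ν_{P+1} t = e, so (P+1)^e ∣ t
      have hfact : t.factorization (P+1) = e := by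
        have h1 := congrArg (fun f => f (P+1))
          (Nat.factorization_mul (show S ≠ 0 by omega) htne)
        simp only [Finsupp.add_apply] at h1
        rw [← ht] at h1
        rw [hedef] at h1
        omega
      obtain ⟨u, hu⟩ : ∃ u, t = (P+1) ^ e * u := by
        have := Nat.ordProj_dvd t (P+1)
        rw [hfact] at this
        exact this
      have hune : u ≠ 0 := by rintro rfl; rw [Nat.mul_zero] at hu; exact htne hu
      have hqpow : (P+1) ^ e = (P+1) * (P+1) ^ (e - 1) := pow_pred_mul hepos
      have hdivS : m / S = t := by rw [ht, Nat.mul_div_cancel_left _ (by omega)]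
      have hFX : Fphi P m
          = ((P+1) ^ (e - 1) * u * Nat.totient S) * (P+1) := by
        rw [ih m hm, hSdef, hdivS, hu, hqpow]; ring
      have hFq : Fphi P m / (P+1)
          = (P+1) ^ (e - 1) * u * Nat.totient S := by
        rw [hFX]
        exact Nat.mul_div_cancel _ (by omega)
      have hLHS : Fphi (P+1) m
          = ((P+1) ^ (e - 1) * u * Nat.totient S) * (P+1-1) := by
        rw [Fphi, if_pos ⟨hq, hqd⟩, hFq, hFX, Nat.mul_sub, Nat.mul_one]
      have hsm' : smP (P+1) m = S * (P+1) ^ e := by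
        rw [show smP (P+1) m = smP P m * (P+1) ^ (m.factorization (P+1)) from rfl,
          hSdef, hedef]
      have hdiv' : m / (S * (P+1) ^ e) = u := by
        rw [ht, hu, show S * ((P+1) ^ e * u) = (S * (P+1) ^ e) * u by ring]
        exact Nat.mul_div_cancel_left _ (Nat.mul_pos (by omega) (pow_pos (by omega) _))
      have hphi' : Nat.totient (S * (P+1) ^ e)
          = Nat.totient S * ((P+1) ^ (e - 1) * (P+1-1)) := by
        rw [← hSdef, Nat.totient_mul (smP_coprime_pow hq), Nat.totient_prime_pow hq hepos,
          hSdef]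
      rw [hLHS, hsm', hdiv', hphi']
      ring
    · have hnu : m.factorization (P+1) = 0 := by
        by_cases hqp : (P+1).Prime
        · exact Nat.factorization_eq_zero_of_not_dvd (fun h => hc ⟨hqp, h⟩)
        · exact Nat.factorization_eq_zero_of_not_prime m hqp
      have hsm' : smP (P+1) m = smP P m := by
        show smP P m * (P+1) ^ (m.factorization (P+1)) = smP P m
        rw [hnu, pow_zero, Nat.mul_one]
      have hF' : Fphi (P+1) m = Fphi P m := by
        rw [Fphi, if_neg hc]
      rw [hF', hsm', ih m hm]

theorem Fphi_of_le {P m : Nat} (h1 : 1 ≤ m) (h2 : m ≤ P) : Fphi P m = Nat.totient m := by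
  have hsm : smP P m = m :=
    smP_eq_self (by omega) (fun q _ hqd => le_trans (Nat.le_of_dvd (by omega) hqd) h2)
  rw [Fphi_eq P m (by omega), hsm, Nat.div_self (by omega), one_mul]

theorem Fphi_prime_self {p : Nat} (hp : p.Prime) : Fphi (p - 1) p = p := by
  have hp2 := hp.two_le
  have hsm : smP (p - 1) p = 1 := by
    have hdvd := smP_dvd (p - 1) p (by omega)
    rcases hp.eq_one_or_self_of_dvd (smP (p - 1) p) hdvd with h | h
    · exact h
    · exfalso
      have h2 : p ∣ smP (p - 1) p := by rw [h]
      have := prime_dvd_smP hp (p - 1) p h2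
      omega
  rw [Fphi_eq (p - 1) p (by omega), hsm, Nat.div_one, Nat.totient_one, mul_one]

theorem Fphi_composite_self {p : Nat} (h2 : 2 ≤ p) (hnp : ¬ p.Prime) :
    Fphi (p - 1) p = Nat.totient p ∧ Nat.totient p ≠ p := by
  have hsm : smP (p - 1) p = p := by
    apply smP_eq_self (by omega)
    intro q hq hqd
    have hle : q ≤ p := Nat.le_of_dvd (by omega) hqd
    have hne : q ≠ p := fun h => hnp (h ▸ hq)
    omega
  constructor
  · rw [Fphi_eq (p - 1) p (by omega), hsm, Nat.div_self (by omega), one_mul]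
  · have := Nat.totient_lt p (by omega)
    omega

-- membership in the inner range: the multiples of p up to n
theorem mem_inner_range {p n j : Nat} (hp : 1 ≤ p) :
    j ∈ List.range' p (n / p) p ↔ p ∣ j ∧ p ≤ j ∧ j ≤ n := by
  rw [List.mem_range']
  constructor
  · rintro ⟨i, hi, rfl⟩
    refine ⟨⟨1 + i, by ring⟩, by omega, ?_⟩
    have h1 : 1 + i ≤ n / p := by omega
    have h2 : p * (1 + i) ≤ p * (n / p) := Nat.mul_le_mul_left p h1
    have h3 : p * (n / p) ≤ n := Nat.mul_div_le n p
    have h4 : p + p * i = p * (1 + i) := by ring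
    omega
  · rintro ⟨⟨t, rfl⟩, hle, hn⟩
    have ht1 : 1 ≤ t := by
      rcases Nat.eq_zero_or_pos t with h | h
      · subst h; rw [Nat.mul_zero] at hle; omega
      · exact h
    have ht2 : t ≤ n / p := (Nat.le_div_iff_mul_le hp).mpr (by rw [Nat.mul_comm]; exact hn)
    refine ⟨t - 1, by omega, ?_⟩
    have h5 : p ≤ p * t := Nat.le_mul_of_pos_right p ht1
    rw [Nat.mul_sub, Nat.mul_one]
    omega

-- folding `a[m] -= a[m] // p` over a list of distinct in-bounds indices
theorem inner_fold (p : Nat) (hp : 1 ≤ p) :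
    ∀ (L s : Nat) (a : List Nat), (∀ j ∈ List.range' s L p, j < a.length) →
      (((List.range' s L p).foldl (fun a m => a.set m (a[m]! - a[m]! / p)) a).length = a.length ∧
       ∀ j, j < a.length →
        ((List.range' s L p).foldl (fun a m => a.set m (a[m]! - a[m]! / p)) a)[j]!
          = if j ∈ List.range' s L p then a[j]! - a[j]! / p else a[j]!) := by
  intro L
  induction L with
  | zero => intro s a _; simp
  | succ L ih =>
    intro s a hbnd
    rw [List.range'_succ]
    simp only [List.foldl_cons]
    have hs_lt : s < a.length := hbnd s (by rw [List.range'_succ]; exact List.mem_cons_self)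
    have hlen0 : (a.set s (a[s]! - a[s]! / p)).length = a.length := List.length_set
    have htail_gt : ∀ j ∈ List.range' (s + p) L p, s < j := by
      intro j hj
      rw [List.mem_range'] at hj
      obtain ⟨i, _, rfl⟩ := hj
      omega
    have hbnd0 : ∀ j ∈ List.range' (s + p) L p, j < (a.set s (a[s]! - a[s]! / p)).length := by
      intro j hj
      rw [hlen0]
      exact hbnd j (by rw [List.range'_succ]; exact List.mem_cons_of_mem _ hj)
    obtain ⟨ih_len, ih_val⟩ := ih (s + p) (a.set s (a[s]! - a[s]! / p)) hbnd0
    refine ⟨by rw [ih_len, hlen0], ?_⟩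
    intro j hj
    have hj0 : j < (a.set s (a[s]! - a[s]! / p)).length := by omega
    have hval0 : ∀ i, i < a.length →
        (a.set s (a[s]! - a[s]! / p))[i]! = if i = s then a[s]! - a[s]! / p else a[i]! := by
      intro i hi
      by_cases his : i = s
      · subst his
        rw [if_pos rfl, getElem!_pos _ _ (by rw [List.length_set]; exact hi),
          List.getElem_set_self]
      · rw [if_neg his, getElem!_pos _ _ (by rw [List.length_set]; exact hi),
          List.getElem_set_ne (fun h => his h.symm), ← getElem!_pos]
    rw [ih_val j hj0]
    by_cases hmem : j ∈ List.range' (s + p) L p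
    · have hjs : j ≠ s := fun h => by have := htail_gt j hmem; omega
      rw [if_pos hmem, hval0 j hj, if_neg hjs, if_pos (List.mem_cons_of_mem _ hmem)]
    · rw [if_neg hmem, hval0 j hj]
      by_cases hjs : j = s
      · subst hjs
        rw [if_pos rfl, if_pos List.mem_cons_self]
      · rw [if_neg hjs, if_neg (fun h => (List.mem_cons.mp h).elim hjs hmem)]

-- the outer fold maintains phi[m] = Fphi (processed bound) m
theorem outer_fold (n : Nat) :
    ∀ (L s : Nat) (a : List Nat), 2 ≤ s → s + L ≤ n + 1 → a.length = n + 1 →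
      (∀ m, 1 ≤ m → m ≤ n → a[m]! = Fphi (s - 1) m) →
      (((List.range' s L 1).foldl
          (fun phi p =>
            if phi[p]! = p then
              (List.range' p (n / p) p).foldl (fun a m => a.set m (a[m]! - a[m]! / p)) phi
            else phi) a).length = n + 1 ∧
       ∀ m, 1 ≤ m → m ≤ n →
        ((List.range' s L 1).foldl
          (fun phi p =>
            if phi[p]! = p then
              (List.range' p (n / p) p).foldl (fun a m => a.set m (a[m]! - a[m]! / p)) phi
            else phi) a)[m]! = Fphi (s - 1 + L) m) := by
  intro L
  induction L with
  | zero =>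
    intro s a _ _ hlen hval
    simp only [List.range'_zero, List.foldl_nil]
    exact ⟨hlen, fun m h1 h2 => by rw [Nat.add_zero]; exact hval m h1 h2⟩
  | succ L ih =>
    intro s a hs hsL hlen hval
    rw [List.range'_succ]
    simp only [List.foldl_cons]
    have hsn : s ≤ n := by omega
    have hread : a[s]! = Fphi (s - 1) s := hval s (by omega) hsn
    obtain ⟨s', rfl⟩ : ∃ s', s = s' + 1 := ⟨s - 1, by omega⟩
    by_cases hsp : (s' + 1).Prime
    · have hcond : a[s' + 1]! = s' + 1 := by
        rw [hread]
        show Fphi (s' + 1 - 1) (s' + 1) = s' + 1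
        exact Fphi_prime_self hsp
      rw [if_pos hcond]
      have hbnd : ∀ j ∈ List.range' (s' + 1) (n / (s' + 1)) (s' + 1), j < a.length := by
        intro j hj
        rw [mem_inner_range (by omega)] at hj
        omega
      obtain ⟨hilen, hival⟩ := inner_fold (s' + 1) (by omega) (n / (s' + 1)) (s' + 1) a hbnd
      have hnext : ∀ m, 1 ≤ m → m ≤ n →
          ((List.range' (s' + 1) (n / (s' + 1)) (s' + 1)).foldl
            (fun a m => a.set m (a[m]! - a[m]! / (s' + 1))) a)[m]! = Fphi (s' + 1) m := by
        intro m hm1 hmn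
        rw [hival m (by omega)]
        by_cases hd : (s' + 1) ∣ m
        · have hge : s' + 1 ≤ m := Nat.le_of_dvd (by omega) hd
          rw [if_pos ((mem_inner_range (by omega)).mpr ⟨hd, hge, hmn⟩)]
          rw [hval m hm1 hmn]
          show Fphi s' m - Fphi s' m / (s' + 1) = Fphi (s' + 1) m
          rw [Fphi, if_pos ⟨hsp, hd⟩]
        · rw [if_neg (fun h => hd ((mem_inner_range (by omega)).mp h).1)]
          rw [hval m hm1 hmn]
          show Fphi s' m = Fphi (s' + 1) m
          rw [Fphi, if_neg (fun h => hd h.2)]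
      obtain ⟨hL, hV⟩ := ih (s' + 1 + 1)
        ((List.range' (s' + 1) (n / (s' + 1)) (s' + 1)).foldl
          (fun a m => a.set m (a[m]! - a[m]! / (s' + 1))) a)
        (by omega) (by omega) (by rw [hilen, hlen])
        (by intro m h1 h2; rw [hnext m h1 h2]; congr 1)
      refine ⟨hL, ?_⟩
      intro m h1 h2
      rw [hV m h1 h2]
      congr 1
      omega
    · have hcond : a[s' + 1]! ≠ s' + 1 := by
        rw [hread]
        obtain ⟨he, hne⟩ := Fphi_composite_self (p := s' + 1) (by omega) hsp
        show Fphi (s' + 1 - 1) (s' + 1) ≠ s' + 1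
        rw [he]
        exact hne
      rw [if_neg hcond]
      obtain ⟨hL, hV⟩ := ih (s' + 1 + 1) a (by omega) (by omega) hlen
        (by
          intro m h1 h2
          rw [hval m h1 h2]
          show Fphi s' m = Fphi (s' + 1 + 1 - 1) m
          show Fphi s' m = Fphi (s' + 1) m
          rw [Fphi, if_neg (fun h => hsp h.1)])
      refine ⟨hL, ?_⟩
      intro m h1 h2
      rw [hV m h1 h2]
      congr 1
      omega

theorem sievePhi_eq (n m : Nat) (h1 : 1 ≤ m) (h2 : m ≤ n) :
    (sievePhi n)[m]! = Nat.totient m := by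
  unfold sievePhi
  obtain ⟨_, hV⟩ := outer_fold n (n - 1) 2 (List.range (n + 1)) (le_refl 2) (by omega)
    (by simp)
    (by
      intro m' hm1 hm2
      rw [getElem!_pos _ _ (by simp only [List.length_range]; omega), List.getElem_range]
      show m' = Fphi 1 m'
      rw [show (1 : Nat) = 0 + 1 from rfl, Fphi,
        if_neg (by intro h; exact Nat.not_prime_one h.1)]
      rfl)
  rw [hV m h1 h2]
  rw [show 2 - 1 + (n - 1) = n by omega]
  exact Fphi_of_le h1 h2

-- ---- assembly ----

theorem totient_shift_agree (indices : List Int) :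
    totient_shift indices = totient_shift_alt indices := by
  unfold totient_shift totient_shift_alt
  apply List.ext_getElem
  · simp [PySem.List.length_enumerate]
  · intro k hk1 hk2
    simp only [List.getElem_map, List.getElem_range, PySem.List.getElem_enumerate]
    have hklen : k < indices.length := by simpa using hk1
    congr 1
    have hA : (PySem.List.pyGet? indices (Int.ofNat k)).getD 0 = indices[k] := by
      have hcast := PySem.List.pyGet?_natCast indices k
      rw [show Int.ofNat k = (k : Int) from rfl, hcast, List.getElem?_eq_getElem hklen]
      rfl
    have hidx : ((0 : Int) + (k : Int)).toNat = k := by omega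
    rw [hA, hidx]
    have hphi : (sievePhi indices.length)[k + 1]! = Nat.totient (k + 1) :=
      sievePhi_eq indices.length (k + 1) (by omega) (by omega)
    rw [hphi, eulerPhiA_eq (k + 1) (by omega)]

-- ===== VERDICT (by name: the statement is the Claim_ definition above) =====
theorem totient_shift_spec : Claim_equal_totient_shift := by
  intro indices _
  unfold Spec_totient_shift
  exact totient_shift_agree indices
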